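-- pv_equiv track=rewrite | github.com/Abiksoumya/competitor-insight | tools/browser_tool.py | _score_page
-- ===== SOURCE A (Python) =====
-- def _score_page(url: str) -> int:
--     """
--     Scores a URL by competitive intelligence value.
--     Higher score = more valuable to scrape.
--
--     Scoring handles URL variations across different websites:
--         /pricing, /plans, /price      → all score 10
--         /features, /product           → all score 9
--
--     Args:
--         url: Page URL to score
--
--     Returns:
--         Integer score 1-10
--     """
--     url_lower = url.lower()
--
--     score_map: list[tuple[int, list[str]]] = [
--         (10, ["pricing", "price", "plans", "plan", "cost"]),
--         (9,  ["features", "feature", "product", "platform"]),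
--         (8,  ["solution", "solutions", "use-case", "usecase"]),
--         (6,  ["about", "company", "team", "story"]),
--         (5,  ["integration", "integrations", "marketplace"]),
--         (3,  ["blog", "resources", "docs", "documentation"]),
--         (1,  ["careers", "jobs", "press", "legal", "privacy", "terms"]),
--     ]
--
--     for score, keywords in score_map:
--         if any(kw in url_lower for kw in keywords):
--             return score
--
--     return 2  # default for unknown pages
-- ===== SOURCE B (Python) =====
-- # Different algorithm: instead of testing each keyword against the URL, scan the
-- # URL's character positions and look each window (one per distinct keyword
-- # length) up in a keyword->score hash map, keeping the maximum hit.
-- _SCORES = {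
--     "pricing": 10, "price": 10, "plans": 10, "plan": 10, "cost": 10,
--     "features": 9, "feature": 9, "product": 9, "platform": 9,
--     "solution": 8, "solutions": 8, "use-case": 8, "usecase": 8,
--     "about": 6, "company": 6, "team": 6, "story": 6,
--     "integration": 5, "integrations": 5, "marketplace": 5,
--     "blog": 3, "resources": 3, "docs": 3, "documentation": 3,
--     "careers": 1, "jobs": 1, "press": 1, "legal": 1, "privacy": 1, "terms": 1,
-- }
-- _LENS = (4, 5, 7, 8, 9, 11, 12, 13)  # the distinct keyword lengths
--
-- def _score_page(url: str) -> int: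
--     u = url.lower()
--     best = 0
--     for i in range(len(u)):
--         for n in _LENS:
--             s = _SCORES.get(u[i:i+n], 0)
--             if s > best:
--                 best = s
--     return best or 2
-- ===== Notes on version B (the rewrite author's own statement) =====
-- stated objective: alternative
-- what changed: Inverted the traversal: instead of scanning the tiered keyword table and testing each keyword as a substring of the URL with early return, B slides over the URL's positions, looks each window (one per distinct keyword length) up in a flat keyword-to-score hash map, and keeps the maximum hit (0 meaning no hit, defaulted to 2); correct because the tiers' scores are distinct so first matching tier equals maximum matching score.
import Mathlib
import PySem

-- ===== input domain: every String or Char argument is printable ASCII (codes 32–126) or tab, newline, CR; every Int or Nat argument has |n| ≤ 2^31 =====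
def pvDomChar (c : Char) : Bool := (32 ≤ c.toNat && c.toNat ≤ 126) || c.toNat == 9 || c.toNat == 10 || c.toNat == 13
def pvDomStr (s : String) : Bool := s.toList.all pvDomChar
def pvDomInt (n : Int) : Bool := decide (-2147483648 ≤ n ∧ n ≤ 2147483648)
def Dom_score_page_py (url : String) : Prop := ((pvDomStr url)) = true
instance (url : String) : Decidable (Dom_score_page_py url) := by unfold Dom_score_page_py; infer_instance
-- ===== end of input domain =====

-- B inverts the traversal: it slides over the URL's positions and looks each window up in a
-- keyword→score hash map, keeping the maximum hit, instead of A's tiered early-return keyword scan.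


-- ===== PORT A =====
-- the keyword tiers of A's score_map
def kws10 : List String := ["pricing", "price", "plans", "plan", "cost"]
def kws9 : List String := ["features", "feature", "product", "platform"]
def kws8 : List String := ["solution", "solutions", "use-case", "usecase"]
def kws6 : List String := ["about", "company", "team", "story"]
def kws5 : List String := ["integration", "integrations", "marketplace"]
def kws3 : List String := ["blog", "resources", "docs", "documentation"]
def kws1 : List String := ["careers", "jobs", "press", "legal", "privacy", "terms"]

def scoreMapA : List (Int × List String) :=
  [(10, kws10), (9, kws9), (8, kws8), (6, kws6), (5, kws5), (3, kws3), (1, kws1)]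

-- the for-loop with early return, as structural recursion over score_map
def loopA (u : String) : List (Int × List String) → Int
  | [] => 2
  | (s, kws) :: rest =>
      if kws.any (fun kw => PySem.Str.isIn kw u) = true then s else loopA u rest

def score_page_py (url : String) : Int :=
  loopA (PySem.Str.lower url) scoreMapA

-- ===== PORT B =====
-- Source B's flat keyword→score dict and its tuple of distinct keyword lengths
def scoresB : PySem.Dict String Int := PySem.Dict.ofList
  [("pricing", 10), ("price", 10), ("plans", 10), ("plan", 10), ("cost", 10),
   ("features", 9), ("feature", 9), ("product", 9), ("platform", 9),
   ("solution", 8), ("solutions", 8), ("use-case", 8), ("usecase", 8),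
   ("about", 6), ("company", 6), ("team", 6), ("story", 6),
   ("integration", 5), ("integrations", 5), ("marketplace", 5),
   ("blog", 3), ("resources", 3), ("docs", 3), ("documentation", 3),
   ("careers", 1), ("jobs", 1), ("press", 1), ("legal", 1), ("privacy", 1), ("terms", 1)]

def lensB : List Int := [4, 5, 7, 8, 9, 11, 12, 13]

def score_page_py_alt (url : String) : Int :=
  let u := PySem.Str.lower url
  let best := (PySem.List.pyRange 0 (PySem.Str.len u) 1).foldl
    (fun best i => lensB.foldl
      (fun best n =>
        let s := scoresB.getD (PySem.Str.slice u (some i) (some (i + n))) 0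
        if s > best then s else best) best) 0
  if best = 0 then 2 else best

-- ===== PRECONDITION & SPEC =====
def Spec_score_page_py (url : String) (out : Int) : Prop := out = score_page_py_alt url
instance (url : String) (out : Int) : Decidable (Spec_score_page_py url out) := by unfold Spec_score_page_py; infer_instance

-- ===== CLAIM (what is proved, stated in full; the proofs are below) =====
def Claim_equal_score_page_py : Prop := ∀ (url : String), Dom_score_page_py url → Spec_score_page_py url (score_page_py url)

-- ===== LEMMAS AND PROOFS =====

-- proof-only definitions: the per-keyword contribution and the flat keyword maximum
def contrib (u : String) (p : String × Int) : Int :=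
  if PySem.Str.isIn p.1 u = true then p.2 else 0

def bestOf (u : String) : Int :=
  scoresB.items.foldl (fun b p => max b (contrib u p)) 0

-- the window lookup of B and its accumulated maximum
def winScore (u : String) (i n : Int) : Int :=
  scoresB.getD (PySem.Str.slice u (some i) (some (i + n))) 0

def coreB (u : String) : Int :=
  (PySem.List.pyRange 0 (PySem.Str.len u) 1).foldl
    (fun b i => lensB.foldl (fun b n => max b (winScore u i n)) b) 0

-- one tier's contribution term
def tOf (u : String) (kws : List String) (s : Int) : Int :=
  if (kws.any fun kw => PySem.Str.isIn kw u) = true then s else 0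

-- literal facts about the tables
theorem items_scoresB : scoresB.items =
    kws10.map (fun k => (k, (10 : Int))) ++ kws9.map (fun k => (k, 9)) ++
    kws8.map (fun k => (k, 8)) ++ kws6.map (fun k => (k, 6)) ++
    kws5.map (fun k => (k, 5)) ++ kws3.map (fun k => (k, 3)) ++
    kws1.map (fun k => (k, 1)) := by decide

theorem nodup_keys_scoresB : scoresB.keys.Nodup := by decide

theorem lens_facts : ∀ p ∈ scoresB.items, 0 < p.1.length ∧ ((p.1.length : Int) ∈ lensB) := by decide

theorem lensB_nonneg : ∀ n ∈ lensB, (0 : Int) ≤ n := by decide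

-- "if s > b then s else b" IS max
theorem ifgt_eq_max (b s : Int) : (if s > b then s else b) = max b s := by
  split_ifs <;> omega

-- generic fold lemmas
theorem foldl_mono_init {α : Type} (l : List α) (F : Int → α → Int)
    (hF : ∀ b x, b ≤ F b x) (a : Int) : a ≤ l.foldl F a := by
  induction l generalizing a with
  | nil => simp
  | cons x xs ih => exact le_trans (hF a x) (ih (F a x))

theorem foldl_le_of {α : Type} (l : List α) (F : Int → α → Int) (a c : Int)
    (ha : a ≤ c) (h : ∀ b x, x ∈ l → b ≤ c → F b x ≤ c) : l.foldl F a ≤ c := by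
  induction l generalizing a with
  | nil => simpa
  | cons x xs ih =>
      exact ih (F a x) (h a x (by simp) ha) (fun b y hy hb => h b y (by simp [hy]) hb)

theorem elem_le_nested {α β : Type} (l₁ : List α) (l₂ : List β) (h : α → β → Int)
    {i : α} {n : β} (hn : n ∈ l₂) :
    ∀ (a : Int), i ∈ l₁ →
      h i n ≤ l₁.foldl (fun b i => l₂.foldl (fun b n => max b (h i n)) b) a := by
  induction l₁ with
  | nil => intro a hi; cases hi
  | cons x xs ih =>
      intro a hi
      rcases List.mem_cons.mp hi with rfl | hi'
      · simp only [List.foldl_cons]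
        refine le_trans ((PySem.List.le_foldl_max_int l₂ (h i) a).2 n hn) ?_
        exact foldl_mono_init xs _ (fun b x => (PySem.List.le_foldl_max_int l₂ (h x) b).1) _
      · exact ih _ hi'

-- a (drop, take) window is an infix
theorem window_infix {α : Type} (l : List α) (a b : Nat) :
    List.take b (List.drop a l) <:+: l :=
  ((List.take_prefix b (List.drop a l)).isInfix).trans ((List.drop_suffix a l).isInfix)

-- a nonempty infix occurs as a window at some position < length
theorem infix_window {α : Type} {kw l : List α} (h : kw <:+: l) (hne : kw ≠ []) :
    ∃ j : Nat, j < l.length ∧ List.take kw.length (List.drop j l) = kw := by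
  rcases h with ⟨s, t, rfl⟩
  have hk : 0 < kw.length := List.length_pos_iff.mpr hne
  refine ⟨s.length, ?_, ?_⟩
  · simp [List.length_append]; omega
  · rw [List.append_assoc, List.drop_left, List.take_left]

-- 0 ≤ bestOf and 0 ≤ coreB
theorem bestOf_nonneg (u : String) : 0 ≤ bestOf u :=
  (PySem.List.le_foldl_max_int scoresB.items (contrib u) 0).1

theorem coreB_nonneg (u : String) : 0 ≤ coreB u :=
  foldl_mono_init _ _ (fun b i => (PySem.List.le_foldl_max_int lensB (winScore u i) b).1) 0

-- every window lookup of B is at most the flat keyword maximum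
theorem winScore_le_bestOf (u : String) (i n : Int) (hi : 0 ≤ i) (hn : 0 ≤ n) :
    winScore u i n ≤ bestOf u := by
  by_cases h0 : winScore u i n = 0
  · rw [h0]; exact bestOf_nonneg u
  · set w := PySem.Str.slice u (some i) (some (i + n)) with hw
    have hc : scoresB.contains w = true := by
      by_contra hc
      exact h0 (PySem.Dict.getD_of_not_contains scoresB 0 (by simpa using hc))
    have hk : w ∈ scoresB.keys := (PySem.Dict.contains_iff_mem_keys scoresB w).mp hc
    have hk' : w ∈ scoresB.items.map Prod.fst := hk
    obtain ⟨⟨p1, p2⟩, hp, hpw⟩ := List.mem_map.mp hk'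
    simp only [] at hpw
    subst hpw
    have hg : scoresB.getD w 0 = p2 :=
      PySem.Dict.getD_of_mem_items scoresB hp nodup_keys_scoresB 0
    have hin : PySem.Str.isIn w u = true := by
      rw [PySem.Str.isIn_iff_infix, hw]
      rw [PySem.Str.toList_slice, PySem.Chars.slice_eq_listSlice,
        PySem.List.slice_toNat u.toList hi (by omega)]
      exact window_infix _ _ _
    have hle := (PySem.List.le_foldl_max_int scoresB.items (contrib u) 0).2 _ hp
    have heq : winScore u i n = p2 := by rw [winScore, ← hw]; exact hg
    rw [heq]
    calc p2 = contrib u (w, p2) := by rw [contrib, if_pos hin]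
      _ ≤ bestOf u := hle

-- every matched keyword's score is at most B's window maximum
theorem contrib_le_coreB (u : String) (p : String × Int) (hp : p ∈ scoresB.items) :
    contrib u p ≤ coreB u := by
  rw [contrib]
  split_ifs with hin
  · have hinf : p.1.toList <:+: u.toList := (PySem.Str.isIn_iff_infix p.1 u).mp hin
    have hpos : 0 < p.1.length := (lens_facts p hp).1
    have hne : p.1.toList ≠ [] := by
      intro h
      have : p.1.toList.length = 0 := by rw [h]; rfl
      rw [String.length_toList] at this; omega
    obtain ⟨j, hj, hwin⟩ := infix_window hinf hne
    have hjmem : (j : Int) ∈ PySem.List.pyRange 0 (PySem.Str.len u) 1 := by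
      rw [PySem.List.mem_pyRange_one]
      constructor
      · positivity
      · have : PySem.Str.len u = (u.toList.length : Int) := by simp [PySem.Str.len]
        rw [this]; exact_mod_cast hj
    have hlmem : ((p.1.length : Int)) ∈ lensB := (lens_facts p hp).2
    have hws : winScore u (j : Int) (p.1.length : Int) = p.2 := by
      rw [winScore]
      have hslice : PySem.Str.slice u (some (j : Int)) (some ((j : Int) + (p.1.length : Int))) = p.1 := by
        rw [← String.toList_inj, PySem.Str.toList_slice, PySem.Chars.slice_eq_listSlice,
          PySem.List.slice_toNat u.toList (by positivity) (by positivity)]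
        have h1 : ((j : Int) + (p.1.length : Int)).toNat - ((j : Int)).toNat = p.1.length := by omega
        rw [h1, Int.toNat_natCast, ← String.length_toList]
        exact hwin
      rw [hslice]
      exact PySem.Dict.getD_of_mem_items scoresB (by rwa [Prod.mk.eta]) nodup_keys_scoresB 0
    rw [← hws]
    exact elem_le_nested _ lensB (winScore u) hlmem 0 hjmem
  · exact coreB_nonneg u

-- B's double fold equals the flat keyword maximum
theorem coreB_eq_bestOf (u : String) : coreB u = bestOf u := by
  refine le_antisymm ?_ ?_
  · exact foldl_le_of _ _ 0 (bestOf u) (bestOf_nonneg u)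
      (fun b i hi hb =>
        foldl_le_of lensB _ b (bestOf u) hb
          (fun b' n hn hb' =>
            max_le hb'
              (winScore_le_bestOf u i n ((PySem.List.mem_pyRange_one.mp hi).1 : (0:Int) ≤ i)
                (lensB_nonneg n hn))))
  · exact foldl_le_of _ _ 0 (coreB u) (coreB_nonneg u)
      (fun b p hp hb => max_le hb (contrib_le_coreB u p hp))

-- one constant-score segment of the items fold is A's `any` over that tier
theorem segB (u : String) (kws : List String) (s : Int) : ∀ (b : Int), 0 ≤ b →
    List.foldl (fun b p => max b (contrib u p)) b (kws.map (fun k => (k, s)))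
    = max b (tOf u kws s) := by
  induction kws with
  | nil => intro b hb; simp [tOf]; omega
  | cons k ks ih =>
      intro b hb
      simp only [List.map_cons, List.foldl_cons]
      rw [ih _ (le_trans hb (le_max_left _ _))]
      simp only [contrib, tOf, List.any_cons]
      by_cases h1 : PySem.Str.isIn k u = true <;>
        by_cases h3 : (ks.any fun kw => PySem.Str.isIn kw u) = true <;>
          simp only [h1, h3, Bool.true_or, Bool.false_or] <;> split_ifs <;> omega

theorem bestOf_eq (u : String) : bestOf u =
    max (max (max (max (max (max (max 0 (tOf u kws10 10)) (tOf u kws9 9)) (tOf u kws8 8))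
      (tOf u kws6 6)) (tOf u kws5 5)) (tOf u kws3 3)) (tOf u kws1 1) := by
  have t0 : (0 : Int) ≤ 0 := le_rfl
  rw [bestOf, items_scoresB]
  simp only [List.foldl_append]
  rw [segB u kws10 10 0 t0]
  have t1 : (0 : Int) ≤ max 0 (tOf u kws10 10) := le_max_left _ _
  rw [segB u kws9 9 _ t1]
  have t2 := le_trans t1 (le_max_left _ (tOf u kws9 9))
  rw [segB u kws8 8 _ t2]
  have t3 := le_trans t2 (le_max_left _ (tOf u kws8 8))
  rw [segB u kws6 6 _ t3]
  have t4 := le_trans t3 (le_max_left _ (tOf u kws6 6))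
  rw [segB u kws5 5 _ t4]
  have t5 := le_trans t4 (le_max_left _ (tOf u kws5 5))
  rw [segB u kws3 3 _ t5]
  have t6 := le_trans t5 (le_max_left _ (tOf u kws3 3))
  rw [segB u kws1 1 _ t6]

theorem score_page_py_eq_alt (url : String) : score_page_py url = score_page_py_alt url := by
  have halt : score_page_py_alt url =
      if coreB (PySem.Str.lower url) = 0 then 2 else coreB (PySem.Str.lower url) := by
    simp only [score_page_py_alt, coreB, winScore, ifgt_eq_max]
  rw [halt, coreB_eq_bestOf, bestOf_eq]
  rw [score_page_py]
  simp only [scoreMapA, loopA, tOf]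
  cases h10 : (kws10.any fun kw => PySem.Str.isIn kw (PySem.Str.lower url)) <;>
    cases h9 : (kws9.any fun kw => PySem.Str.isIn kw (PySem.Str.lower url)) <;>
      cases h8 : (kws8.any fun kw => PySem.Str.isIn kw (PySem.Str.lower url)) <;>
        cases h6 : (kws6.any fun kw => PySem.Str.isIn kw (PySem.Str.lower url)) <;>
          cases h5 : (kws5.any fun kw => PySem.Str.isIn kw (PySem.Str.lower url)) <;>
            cases h3 : (kws3.any fun kw => PySem.Str.isIn kw (PySem.Str.lower url)) <;>
              cases h1 : (kws1.any fun kw => PySem.Str.isIn kw (PySem.Str.lower url)) <;>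
                decide

-- ===== VERDICT (by name: the statement is the Claim_ definition above) =====
theorem score_page_py_spec : Claim_equal_score_page_py := by
  intro url _
  unfold Spec_score_page_py
  exact score_page_py_eq_alt url
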